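-- pv_equiv track=rewrite | github.com/davidrajones/adventofcode | 2023/14/14b.py | roll_south
-- ===== SOURCE A (Python) =====
-- from functools import cmp_to_key
--
-- def sort_n_s(a, b):
--     (ax, ay) = a
--     (bx, by) = b
--     if ax < bx: return -1
--     if ax > bx: return 1
--     if ay < by: return -1
--     if ay > by: return 1
--     return 0
--
-- def roll_south(rollers, static, data):
--     rollers = sorted(rollers, key=cmp_to_key(sort_n_s), reverse=True)
--     for i in range(len(rollers)):
--         (x, y) = rollers[i]
--         thisx = x
--         while thisx + 1 < len(data):
--             thisx += 1
--             if (thisx,y) in rollers or (thisx,y) in static: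
--                 break
--             x = thisx
--         rollers[i] = (x, y)
--     return rollers
-- ===== SOURCE B (Python) =====
-- def roll_south(rollers, static, data):
--     # One pass over the rollers in lexicographically descending order, keeping a
--     # per-column "lowest free row" pointer; the nearest static blocker below is a
--     # single min-scan over the statics instead of stepping row by row.
--     n = len(data)
--     limit = {}
--     out = []
--     for (x, y) in sorted(rollers, reverse=True):
--         cand = n - 1
--         l = limit.get(y)
--         if l is not None and l < cand:
--             cand = l
--         for (sx, sy) in static:
--             if sy == y and sx > x and sx - 1 < cand:
--                 cand = sx - 1
--         new_x = cand if cand > x else x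
--         out.append((new_x, y))
--         limit[y] = new_x - 1
--     return out
-- ===== Notes on version B (the rewrite author's own statement) =====
-- stated objective: faster
-- what changed: A re-sorts and then, for every roller, walks south row by row testing membership in the whole (mutating) roller list and the static set; B makes one pass over the descending-sorted rollers keeping a per-column lowest-free-row pointer in a dict and finds the nearest static blocker with a single min-scan of the statics, so the row-by-row walk and the O(n) roller-membership tests disappear.
import Mathlib
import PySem

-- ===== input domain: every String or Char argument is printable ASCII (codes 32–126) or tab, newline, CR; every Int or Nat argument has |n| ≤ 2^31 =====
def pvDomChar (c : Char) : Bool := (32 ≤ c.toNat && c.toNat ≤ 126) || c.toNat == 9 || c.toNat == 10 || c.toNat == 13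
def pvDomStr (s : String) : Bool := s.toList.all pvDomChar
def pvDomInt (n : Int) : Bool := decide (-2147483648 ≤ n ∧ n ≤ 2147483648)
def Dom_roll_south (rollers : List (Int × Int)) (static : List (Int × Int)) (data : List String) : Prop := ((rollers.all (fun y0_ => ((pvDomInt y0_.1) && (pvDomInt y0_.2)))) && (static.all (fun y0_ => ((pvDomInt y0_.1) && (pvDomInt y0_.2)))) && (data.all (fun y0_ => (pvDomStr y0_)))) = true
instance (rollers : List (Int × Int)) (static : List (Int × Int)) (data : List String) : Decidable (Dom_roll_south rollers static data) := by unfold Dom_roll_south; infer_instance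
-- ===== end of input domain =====

-- B replaces A's per-roller row-by-row walk with list membership tests by one pass over the
-- descending-sorted rollers keeping a per-column "lowest free row" pointer (measured faster).

-- ===== PORT A =====
def sort_n_s (a : Int × Int) (b : Int × Int) : Int :=
  if a.1 < b.1 then -1
  else if b.1 < a.1 then 1
  else if a.2 < b.2 then -1
  else if b.2 < a.2 then 1
  else 0

-- sorted(rollers, key=cmp_to_key(sort_n_s), reverse=True): Python's stable sort under the
-- comparator with every comparison reversed.  Exact: sort_n_s is a total order whose ties are
-- only identical pairs, so the stable insertion sort (PySem's model of Python's sort) with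
-- before a b := sort_n_s b a < 0 returns the very list CPython returns.
def pvSortedCmpRev (xs : List (Int × Int)) : List (Int × Int) :=
  xs.foldl (fun acc x => PySem.List.insertBy (fun a b => decide (sort_n_s b a < 0)) x acc) []

-- the inner 'while thisx + 1 < len(data)' walk of A, for roller (x, y)
def rollFrom (rs : List (Int × Int)) (static : List (Int × Int)) (n : Int) (y : Int) (x : Int) : Int :=
  if h : x + 1 < n then
    if (x + 1, y) ∈ rs ∨ (x + 1, y) ∈ static then x
    else rollFrom rs static n y (x + 1)
  else x
termination_by (n - x).toNat
decreasing_by omega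

-- 'for i in range(len(rollers)): … rollers[i] = (x, y)' — the list is mutated in place,
-- so later membership tests see the already-moved rollers
def rollIdx (static : List (Int × Int)) (n : Int) (rs : List (Int × Int)) (i : Nat) : List (Int × Int) :=
  if h : i < rs.length then
    rollIdx static n (rs.set i (rollFrom rs static n rs[i].2 rs[i].1, rs[i].2)) (i + 1)
  else rs
termination_by rs.length - i
decreasing_by simp; omega

def roll_south (rollers : List (Int × Int)) (static : List (Int × Int)) (data : List String) : List (Int × Int) :=
  rollIdx static (data.length : Int) (pvSortedCmpRev rollers) 0

-- ===== PORT B =====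
-- the min-scan over the statics: smallest landing row forced by a static strictly below x
def pvStaticMin (static : List (Int × Int)) (x : Int) (y : Int) (c0 : Int) : Int :=
  static.foldl (fun c s => if s.2 = y ∧ x < s.1 ∧ s.1 - 1 < c then s.1 - 1 else c) c0

def rollStep (static : List (Int × Int)) (n : Int)
    (st : PySem.Dict Int Int × List (Int × Int)) (p : Int × Int) :
    PySem.Dict Int Int × List (Int × Int) :=
  let x := p.1
  let y := p.2
  let cand := n - 1
  let cand := match st.1.get? y with
    | some l => if l < cand then l else cand
    | none => cand
  let cand := pvStaticMin static x y cand
  let newx := if x < cand then cand else x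
  (st.1.insert y (newx - 1), st.2 ++ [(newx, y)])

def roll_south_alt (rollers : List (Int × Int)) (static : List (Int × Int)) (data : List String) : List (Int × Int) :=
  ((PySem.List.sorted2 rollers Prod.fst Prod.snd true).foldl
    (rollStep static (data.length : Int)) (PySem.Dict.empty, [])).2

-- ===== PRECONDITION & SPEC =====
def Spec_roll_south (rollers : List (Int × Int)) (static : List (Int × Int)) (data : List String) (out : List (Int × Int)) : Prop := out = roll_south_alt rollers static data
instance (rollers : List (Int × Int)) (static : List (Int × Int)) (data : List String) (out : List (Int × Int)) : Decidable (Spec_roll_south rollers static data out) := by unfold Spec_roll_south; infer_instance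

-- ===== CLAIM (what is proved, stated in full; the proofs are below) =====
def Claim_equal_roll_south : Prop := ∀ (rollers : List (Int × Int)) (static : List (Int × Int)) (data : List String), Dom_roll_south rollers static data → Spec_roll_south rollers static data (roll_south rollers static data)

-- ===== LEMMAS AND PROOFS =====

-- descending lexicographic order (non-strict), the order of the sorted roller list
def lexGe (a b : Int × Int) : Prop := b.1 < a.1 ∨ (b.1 = a.1 ∧ b.2 ≤ a.2)

-- A's comparator sort and B's tuple sort are the same fold
lemma sortA_eq_sortB (xs : List (Int × Int)) :
    pvSortedCmpRev xs = PySem.List.sorted2 xs Prod.fst Prod.snd true := by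
  unfold pvSortedCmpRev PySem.List.sorted2
  have h : (fun (a b : Int × Int) => decide (sort_n_s b a < 0)) =
      (fun a b => decide (b.1 < a.1) || (!decide (a.1 < b.1) && decide (b.2 < a.2))) := by
    funext a b
    simp only [sort_n_s]
    split_ifs <;> simp <;> omega
  rw [h]
  rfl

lemma pairwise_insertBy {α : Type} (before : α → α → Bool) (R : α → α → Prop)
    (h1 : ∀ a b, before a b = true → R a b)
    (h2 : ∀ a b, before a b = false → R b a)
    (h3 : ∀ a b c, before a b = true → R b c → R a c) :
    ∀ (ys : List α) (x : α), ys.Pairwise R → (PySem.List.insertBy before x ys).Pairwise R := by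
  intro ys
  induction ys with
  | nil => intro x _; simp [PySem.List.insertBy]
  | cons y ys ih =>
    intro x hp
    rw [List.pairwise_cons] at hp
    by_cases hb : before x y = true
    · show (PySem.List.insertBy before x (y :: ys)).Pairwise R
      simp only [PySem.List.insertBy, hb, if_pos]
      refine List.Pairwise.cons ?_ (List.Pairwise.cons hp.1 hp.2)
      intro z hz
      rcases List.mem_cons.mp hz with rfl | hz'
      · exact h1 _ _ hb
      · exact h3 _ _ _ hb (hp.1 z hz')
    · show (PySem.List.insertBy before x (y :: ys)).Pairwise R
      simp only [PySem.List.insertBy, hb]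
      refine List.Pairwise.cons ?_ (ih x hp.2)
      intro z hz
      rcases (PySem.List.mem_insertBy before x z ys).mp hz with rfl | hz'
      · exact h2 _ _ (by simpa using hb)
      · exact hp.1 z hz'

lemma pairwise_sortA (xs : List (Int × Int)) : (pvSortedCmpRev xs).Pairwise lexGe := by
  unfold pvSortedCmpRev
  have key : ∀ (l : List (Int × Int)) (acc : List (Int × Int)), acc.Pairwise lexGe →
      (l.foldl (fun acc x => PySem.List.insertBy (fun a b => decide (sort_n_s b a < 0)) x acc) acc).Pairwise lexGe := by
    intro l
    induction l with
    | nil => intro acc h; simpa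
    | cons z l ih =>
      intro acc h
      simp only [List.foldl_cons]
      refine ih _ ?_
      refine pairwise_insertBy _ lexGe ?_ ?_ ?_ acc z h
      · intro a b hb
        simp only [sort_n_s, decide_eq_true_eq] at hb
        unfold lexGe
        split_ifs at hb <;> omega
      · intro a b hb
        simp only [sort_n_s, decide_eq_false_iff_not] at hb
        unfold lexGe
        split_ifs at hb <;> omega
      · intro a b c hb hbc
        simp only [sort_n_s, decide_eq_true_eq] at hb
        unfold lexGe at hbc ⊢
        split_ifs at hb <;> omega
  exact key xs [] List.Pairwise.nil

-- characterization of pvStaticMin as a running minimum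
lemma staticMin_le (static : List (Int × Int)) (x y : Int) :
    ∀ c0, pvStaticMin static x y c0 ≤ c0 := by
  unfold pvStaticMin
  induction static with
  | nil => intro c0; simp
  | cons s t ih =>
    intro c0
    simp only [List.foldl_cons]
    split_ifs with h
    · exact le_trans (ih _) (by omega)
    · exact ih c0

lemma staticMin_le_blocker (static : List (Int × Int)) (x y : Int) (s : Int × Int)
    (hs : s ∈ static) (hy : s.2 = y) (hx : x < s.1) :
    ∀ c0, pvStaticMin static x y c0 ≤ s.1 - 1 := by
  unfold pvStaticMin
  induction static with
  | nil => cases hs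
  | cons a t ih =>
    intro c0
    simp only [List.foldl_cons]
    rcases List.mem_cons.mp hs with rfl | hmem
    · by_cases h : s.2 = y ∧ x < s.1 ∧ s.1 - 1 < c0
      · rw [if_pos h]
        exact staticMin_le t x y _
      · rw [if_neg h]
        have h2 := staticMin_le t x y c0
        unfold pvStaticMin at h2
        have h3 : ¬ (s.1 - 1 < c0) := fun hc => h ⟨hy, hx, hc⟩
        omega
    · exact ih hmem _

lemma staticMin_cases (static : List (Int × Int)) (x y : Int) :
    ∀ c0, pvStaticMin static x y c0 = c0 ∨
      ∃ s ∈ static, s.2 = y ∧ x < s.1 ∧ pvStaticMin static x y c0 = s.1 - 1 := by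
  unfold pvStaticMin
  induction static with
  | nil => intro c0; left; simp
  | cons a t ih =>
    intro c0
    simp only [List.foldl_cons]
    split_ifs with h
    · rcases ih (a.1 - 1) with heq | ⟨s, hs, h1, h2, h3⟩
      · right; exact ⟨a, List.mem_cons_self, h.1, h.2.1, heq⟩
      · right; exact ⟨s, List.mem_cons_of_mem _ hs, h1, h2, h3⟩
    · rcases ih c0 with heq | ⟨s, hs, h1, h2, h3⟩
      · left; exact heq
      · right; exact ⟨s, List.mem_cons_of_mem _ hs, h1, h2, h3⟩

-- closed form of A's inner walk: it lands on r when the corridor (x, r] is free and r is blocked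
lemma rollFrom_eq (rs static : List (Int × Int)) (n y : Int) :
    ∀ x r, x ≤ r →
    (∀ t, x < t → t ≤ r → ((t, y) ∉ rs ∧ (t, y) ∉ static ∧ t < n)) →
    (n ≤ r + 1 ∨ (r + 1, y) ∈ rs ∨ (r + 1, y) ∈ static) →
    rollFrom rs static n y x = r := by
  intro x r hxr hmid hstop
  by_cases hlt : x < r
  · -- step forward
    have hx1 := hmid (x + 1) (by omega) (by omega)
    rw [rollFrom]
    rw [dif_pos hx1.2.2]
    rw [if_neg (fun h => h.elim hx1.1 hx1.2.1)]
    exact rollFrom_eq rs static n y (x + 1) r (by omega)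
      (fun t h1 h2 => hmid t (by omega) h2) hstop
  · have hxr' : x = r := by omega
    subst hxr'
    rw [rollFrom]
    by_cases hn : x + 1 < n
    · rw [dif_pos hn]
      rcases hstop with h | h | h
      · omega
      · rw [if_pos (Or.inl h)]
      · rw [if_pos (Or.inr h)]
    · rw [dif_neg hn]
termination_by x r => (r - x).toNat
decreasing_by omega

-- the loop invariant tying B's per-column pointer dict to the already-placed rollers
def INV (static : List (Int × Int)) (n : Int) (d : PySem.Dict Int Int) (out : List (Int × Int)) : Prop :=
  ∀ y : Int,
    (d.get? y = none → ∀ p ∈ out, p.2 ≠ y) ∧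
    (∀ l, d.get? y = some l →
      ((l + 1, y) ∈ out ∧
       (∀ p ∈ out, p.2 = y → l + 1 ≤ p.1) ∧
       (n ≤ l + 2 ∨ (l + 2, y) ∈ out ∨ (l + 2, y) ∈ static)))

lemma set_append_length {α : Type} (out : List α) (q : α) (rest : List α) (v : α) :
    (out ++ q :: rest).set out.length v = out ++ v :: rest := by
  induction out with
  | nil => simp
  | cons a t ih => simp [ih]

-- the first candidate of B's step: the column pointer capped by the last row
def pvCand1 (d : PySem.Dict Int Int) (n y : Int) : Int :=
  match d.get? y with
  | some l => if l < n - 1 then l else n - 1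
  | none => n - 1

lemma pvCand1_le (d : PySem.Dict Int Int) (n y : Int) : pvCand1 d n y ≤ n - 1 := by
  unfold pvCand1
  rcases hgy : d.get? y with _ | l
  · show (n - 1 : Int) ≤ n - 1
    omega
  · show (if l < n - 1 then l else n - 1) ≤ n - 1
    split_ifs <;> omega

lemma pvCand1_le_some (d : PySem.Dict Int Int) (n y : Int) (l : Int) (h : d.get? y = some l) :
    pvCand1 d n y ≤ l := by
  unfold pvCand1
  rw [h]
  show (if l < n - 1 then l else n - 1) ≤ l
  split_ifs <;> omega

lemma pvCand1_cases (d : PySem.Dict Int Int) (n y : Int) :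
    pvCand1 d n y = n - 1 ∨ ∃ l, d.get? y = some l ∧ pvCand1 d n y = l := by
  unfold pvCand1
  rcases hgy : d.get? y with _ | l
  · left; rfl
  · by_cases h : l < n - 1
    · right
      refine ⟨l, rfl, ?_⟩
      show (if l < n - 1 then l else n - 1) = l
      rw [if_pos h]
    · left
      show (if l < n - 1 then l else n - 1) = n - 1
      rw [if_neg h]

lemma rollStep_eq (static : List (Int × Int)) (n : Int)
    (st : PySem.Dict Int Int × List (Int × Int)) (p : Int × Int) :
    rollStep static n st p =
      (st.1.insert p.2 ((if p.1 < pvStaticMin static p.1 p.2 (pvCand1 st.1 n p.2) then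
          pvStaticMin static p.1 p.2 (pvCand1 st.1 n p.2) else p.1) - 1),
       st.2 ++ [((if p.1 < pvStaticMin static p.1 p.2 (pvCand1 st.1 n p.2) then
          pvStaticMin static p.1 p.2 (pvCand1 st.1 n p.2) else p.1), p.2)]) := rfl

-- one step: A's walk for the head roller lands exactly where B's pointer arithmetic says,
-- and the invariant survives placing it
lemma step_core (static : List (Int × Int)) (n : Int) (d : PySem.Dict Int Int)
    (out rest' : List (Int × Int)) (x y : Int)
    (H1 : ∀ q ∈ (x, y) :: rest', q.2 = y → q.1 ≤ x)
    (hcross : ∀ p ∈ out, ∀ q ∈ (x, y) :: rest', q.2 = p.2 → q.1 ≤ p.1)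
    (hinv : INV static n d out) :
    rollFrom (out ++ (x, y) :: rest') static n y x
        = (if x < pvStaticMin static x y (pvCand1 d n y) then pvStaticMin static x y (pvCand1 d n y) else x) ∧
      INV static n
        (d.insert y ((if x < pvStaticMin static x y (pvCand1 d n y) then pvStaticMin static x y (pvCand1 d n y) else x) - 1))
        (out ++ [((if x < pvStaticMin static x y (pvCand1 d n y) then pvStaticMin static x y (pvCand1 d n y) else x), y)]) := by
  have F1 := pvCand1_le d n y
  have F2 := pvCand1_le_some d n y
  have F3 := pvCand1_cases d n y
  set cand1 := pvCand1 d n y with hc1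
  set cand := pvStaticMin static x y cand1 with hcand
  set r := if x < cand then cand else x with hr
  have G1 : cand ≤ cand1 := staticMin_le static x y cand1
  have G2 : ∀ s ∈ static, s.2 = y → x < s.1 → cand ≤ s.1 - 1 :=
    fun s hs h1 h2 => staticMin_le_blocker static x y s hs h1 h2 cand1
  have G3 := staticMin_cases static x y cand1
  rw [← hcand] at G3
  have hr1 : x < cand → r = cand := fun h => by rw [hr, if_pos h]
  have hr2 : ¬ x < cand → r = x := fun h => by rw [hr, if_neg h]
  have hxr : x ≤ r := by
    by_cases h : x < cand
    · rw [hr1 h]; omega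
    · rw [hr2 h]
  have hcrossy : ∀ p ∈ out, p.2 = y → x ≤ p.1 := by
    intro p hp hpy
    have := hcross p hp (x, y) List.mem_cons_self (by simpa using hpy.symm)
    simpa using this
  have hmid : ∀ t, x < t → t ≤ r → ((t, y) ∉ out ++ (x, y) :: rest' ∧ (t, y) ∉ static ∧ t < n) := by
    intro t ht1 ht2
    have hxc : x < cand := by
      by_contra hnc
      rw [hr2 hnc] at ht2
      omega
    rw [hr1 hxc] at ht2
    refine ⟨?_, ?_, by omega⟩
    · intro hmem
      rcases List.mem_append.mp hmem with hmo | hmr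
      · rcases hgy : d.get? y with _ | l
        · exact ((hinv y).1 hgy (t, y) hmo) rfl
        · have h2 := ((hinv y).2 l hgy).2.1 (t, y) hmo rfl
          have h3 := F2 l hgy
          simp only at h2
          omega
      · have := H1 (t, y) hmr rfl
        simp only at this
        omega
    · intro hmem
      have := G2 (t, y) hmem rfl (by simpa using ht1)
      simp only at this
      omega
  have hstop : n ≤ r + 1 ∨ (r + 1, y) ∈ out ∨ (r + 1, y) ∈ static := by
    rcases G3 with hG | ⟨s, hs, hsy, hsx, hse⟩
    · rcases F3 with hF | ⟨l, hgy, hF⟩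
      · left
        by_cases hxc : x < cand
        · rw [hr1 hxc]; omega
        · rw [hr2 hxc]; omega
      · have hmem := ((hinv y).2 l hgy).1
        have hle := ((hinv y).2 l hgy).2.2
        by_cases hxc : x < cand
        · right; left
          have e : (r + 1 : Int) = l + 1 := by rw [hr1 hxc]; omega
          rw [e]
          exact hmem
        · have hrx : r = x := hr2 hxc
          have hxl : x ≤ l + 1 := by simpa using hcrossy (l + 1, y) hmem rfl
          by_cases hlx : l = x
          · right; left
            have e : (r + 1 : Int) = l + 1 := by omega
            rw [e]
            exact hmem
          · have hl1 : l = x - 1 := by omega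
            rcases hle with h | h | h
            · left; omega
            · right; left
              have e : (r + 1 : Int) = l + 2 := by omega
              rw [e]; exact h
            · right; right
              have e : (r + 1 : Int) = l + 2 := by omega
              rw [e]; exact h
    · right; right
      have hr1' : r + 1 = s.1 := by
        by_cases hxc : x < cand
        · rw [hr1 hxc]; omega
        · rw [hr2 hxc]; omega
      rw [hr1']
      have e : ((s.1 : Int), y) = s := by rw [← hsy]
      rw [e]; exact hs
  refine ⟨rollFrom_eq _ static n y x r hxr hmid
    (by rcases hstop with h | h | h
        · exact Or.inl h
        · exact Or.inr (Or.inl (List.mem_append.mpr (Or.inl h)))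
        · exact Or.inr (Or.inr h)), ?_⟩
  intro y'
  by_cases hy' : y' = y
  · subst hy'
    constructor
    · intro hnone
      rw [PySem.Dict.get?_insert_self] at hnone
      cases hnone
    · intro l hl
      rw [PySem.Dict.get?_insert_self] at hl
      have hlr : l = r - 1 := by injection hl with h; omega
      refine ⟨?_, ?_, ?_⟩
      · have e : ((l + 1 : Int), y') = (r, y') := by rw [hlr]; ring_nf
        rw [e]
        exact List.mem_append.mpr (Or.inr List.mem_cons_self)
      · intro p hp hpy
        rcases List.mem_append.mp hp with hpo | hpn
        · have hxp := hcrossy p hpo hpy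
          have hrlep : r ≤ p.1 := by
            by_cases hxc : x < cand
            · rcases hgy : d.get? y' with _ | l0
              · exact absurd hpy ((hinv y').1 hgy p hpo)
              · have h2 := ((hinv y').2 l0 hgy).2.1 p hpo hpy
                have h3 := F2 l0 hgy
                rw [hr1 hxc]
                omega
            · rw [hr2 hxc]; exact hxp
          omega
        · simp only [List.mem_singleton] at hpn
          subst hpn
          simp only
          omega
      · rcases hstop with h | h | h
        · left; omega
        · right; left
          have e : (l + 2 : Int) = r + 1 := by omega
          rw [e]
          exact List.mem_append.mpr (Or.inl h)
        · right; right
          have e : (l + 2 : Int) = r + 1 := by omega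
          rw [e]; exact h
  · rw [PySem.Dict.get?_insert_of_ne _ _ hy']
    constructor
    · intro hnone p hp
      rcases List.mem_append.mp hp with hpo | hpn
      · exact (hinv y').1 hnone p hpo
      · simp only [List.mem_singleton] at hpn
        subst hpn
        intro e
        exact hy' (by simpa using e.symm)
    · intro l hl
      have h := (hinv y').2 l hl
      refine ⟨List.mem_append.mpr (Or.inl h.1), ?_, ?_⟩
      · intro p hp hpy
        rcases List.mem_append.mp hp with hpo | hpn
        · exact h.2.1 p hpo hpy
        · simp only [List.mem_singleton] at hpn
          subst hpn
          exact absurd (by simpa using hpy.symm) hy'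
      · rcases h.2.2 with hh | hh | hh
        · left; exact hh
        · right; left; exact List.mem_append.mpr (Or.inl hh)
        · right; right; exact hh

lemma main_lemma (static : List (Int × Int)) (n : Int) :
    ∀ (rest : List (Int × Int)) (d : PySem.Dict Int Int) (out : List (Int × Int)),
    rest.Pairwise lexGe →
    (∀ p ∈ out, ∀ q ∈ rest, q.2 = p.2 → q.1 ≤ p.1) →
    INV static n d out →
    rollIdx static n (out ++ rest) out.length = (rest.foldl (rollStep static n) (d, out)).2 := by
  intro rest
  induction rest with
  | nil =>
    intro d out _ _ _
    rw [rollIdx]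
    simp
  | cons p rest' ih =>
    intro d out hpair hcross hinv
    obtain ⟨x, y⟩ := p
    have hpc := List.pairwise_cons.mp hpair
    have H1 : ∀ q ∈ (x, y) :: rest', q.2 = y → q.1 ≤ x := by
      intro q hq hqy
      rcases List.mem_cons.mp hq with rfl | hq'
      · simp
      · have := hpc.1 q hq'
        unfold lexGe at this
        simp only at this
        omega
    obtain ⟨hroll, hinv'⟩ := step_core static n d out rest' x y H1 hcross hinv
    set r := if x < pvStaticMin static x y (pvCand1 d n y) then pvStaticMin static x y (pvCand1 d n y) else x with hrdef
    have hxler : x ≤ r := by rw [hrdef]; split_ifs <;> omega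
    have hcross' : ∀ p ∈ out ++ [(r, y)], ∀ q ∈ rest', q.2 = p.2 → q.1 ≤ p.1 := by
      intro p hp q hq hqy
      rcases List.mem_append.mp hp with hpo | hpn
      · exact hcross p hpo q (List.mem_cons_of_mem _ hq) hqy
      · simp only [List.mem_singleton] at hpn
        subst hpn
        have hq1 := H1 q (List.mem_cons_of_mem _ hq) (by simpa using hqy)
        simp only
        omega
    have hB : (((x, y) :: rest').foldl (rollStep static n) (d, out)).2
        = (rest'.foldl (rollStep static n) (d.insert y (r - 1), out ++ [(r, y)])).2 := by
      rw [List.foldl_cons, rollStep_eq]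
    rw [hB]
    rw [rollIdx]
    have hlen : out.length < (out ++ (x, y) :: rest').length := by simp
    rw [dif_pos hlen]
    have hget : (out ++ (x, y) :: rest')[out.length] = (x, y) := List.getElem_of_append rfl rfl
    rw [hget]
    simp only
    rw [hroll, set_append_length]
    have e1 : out ++ (r, y) :: rest' = (out ++ [(r, y)]) ++ rest' := by simp
    have e2 : out.length + 1 = (out ++ [(r, y)]).length := by simp
    rw [e1, e2]
    exact ih (d.insert y (r - 1)) (out ++ [(r, y)]) hpc.2 hcross' hinv'

-- ===== VERDICT (by name: the statement is the Claim_ definition above) =====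
theorem roll_south_spec : Claim_equal_roll_south := by
  intro rollers static data _
  show roll_south rollers static data = roll_south_alt rollers static data
  unfold roll_south roll_south_alt
  rw [← sortA_eq_sortB]
  have h := main_lemma static (data.length : Int) (pvSortedCmpRev rollers) PySem.Dict.empty []
    (pairwise_sortA rollers) (by simp)
    (by intro y; constructor
        · intro _ p hp; cases hp
        · intro l hl; rw [PySem.Dict.get?_empty] at hl; cases hl)
  simpa using h
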